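-- pv_equiv track=rewrite | github.com/franvinci/ProbabilityBasedEventLogGenerator | src/gen_role_utils.py | get_possible_prefixes_act
-- ===== SOURCE A (Python) =====
-- def get_possible_prefixes_act(prefixes_proba_next_role):
--
--     possible_prefixes_act = list(prefixes_proba_next_role.keys())
--     possible_prefixes = dict()
--     for p in possible_prefixes_act:
--         cur_act = p[1]
--         pref = p[0]
--         if cur_act in possible_prefixes.keys():
--             possible_prefixes[cur_act].append(pref)
--         else:
--             possible_prefixes[cur_act] = [pref]
--
--     return possible_prefixes
-- ===== SOURCE B (Python) =====
-- def get_possible_prefixes_act(prefixes_proba_next_role):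
--     keys = list(prefixes_proba_next_role)
--     acts = dict.fromkeys(act for _, act in keys)
--     return {act: [pref for pref, a in keys if a == act] for act in acts}
-- ===== Notes on version B (the rewrite author's own statement) =====
-- stated objective: idiomatic
-- what changed: A builds the result in one pass with a membership test and append-or-create per key; B first collects the distinct activities (dict.fromkeys) and then builds the dict with one filtering comprehension per activity.
import Mathlib
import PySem

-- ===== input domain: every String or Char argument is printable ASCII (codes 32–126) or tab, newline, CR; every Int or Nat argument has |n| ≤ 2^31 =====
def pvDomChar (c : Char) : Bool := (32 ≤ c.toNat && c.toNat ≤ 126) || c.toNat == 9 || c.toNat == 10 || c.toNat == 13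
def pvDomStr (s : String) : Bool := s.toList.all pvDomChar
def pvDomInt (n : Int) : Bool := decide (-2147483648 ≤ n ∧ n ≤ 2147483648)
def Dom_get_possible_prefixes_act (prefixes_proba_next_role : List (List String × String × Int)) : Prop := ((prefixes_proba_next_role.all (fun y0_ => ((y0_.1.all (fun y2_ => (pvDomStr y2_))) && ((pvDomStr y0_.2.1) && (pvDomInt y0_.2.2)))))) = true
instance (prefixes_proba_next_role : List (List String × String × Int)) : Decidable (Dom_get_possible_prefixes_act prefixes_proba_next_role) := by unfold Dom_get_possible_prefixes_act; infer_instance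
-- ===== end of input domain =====

-- B replaces A's single-pass dict-building loop by a two-pass dict comprehension
-- (first-seen activities, then one filter per activity); objective: simpler/idiomatic, not faster.

-- ===== PORT A =====
-- The dict argument arrives as an association list of (pref, cur_act, proba) triples;
-- rebuilding it with PySem.Dict gives Python's key semantics (first position kept, duplicates overwritten).
def get_possible_prefixes_act (prefixes_proba_next_role : List (List String × String × Int)) : List (String × List (List String)) :=
  let d : PySem.Dict (List String × String) Int :=
    PySem.Dict.ofList (prefixes_proba_next_role.map (fun e => ((e.1, e.2.1), e.2.2)))
  let possible_prefixes_act := d.keys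
  let possible_prefixes : PySem.Dict String (List (List String)) :=
    possible_prefixes_act.foldl
      (fun pp p =>
        if pp.contains p.2 then
          pp.modify p.2 [] (fun l => l ++ [p.1])   -- possible_prefixes[cur_act].append(pref)
        else
          pp.insert p.2 [p.1])
      PySem.Dict.empty
  possible_prefixes.items

-- ===== PORT B =====
def get_possible_prefixes_act_alt (prefixes_proba_next_role : List (List String × String × Int)) : List (String × List (List String)) :=
  let keys := PySem.List.dedup (prefixes_proba_next_role.map (fun e => (e.1, e.2.1)))   -- list(d)
  let acts := PySem.List.dedup (keys.map (fun p => p.2))                                -- dict.fromkeys(...)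
  acts.map (fun a => (a, (keys.filter (fun p => p.2 == a)).map (fun p => p.1)))

-- ===== PRECONDITION & SPEC =====
def Spec_get_possible_prefixes_act (prefixes_proba_next_role : List (List String × String × Int)) (out : List (String × List (List String))) : Prop := out = get_possible_prefixes_act_alt prefixes_proba_next_role
instance (prefixes_proba_next_role : List (List String × String × Int)) (out : List (String × List (List String))) : Decidable (Spec_get_possible_prefixes_act prefixes_proba_next_role out) := by unfold Spec_get_possible_prefixes_act; infer_instance

-- ===== CLAIM (what is proved, stated in full; the proofs are below) =====
def Claim_equal_get_possible_prefixes_act : Prop := ∀ (prefixes_proba_next_role : List (List String × String × Int)), Dom_get_possible_prefixes_act prefixes_proba_next_role → Spec_get_possible_prefixes_act prefixes_proba_next_role (get_possible_prefixes_act prefixes_proba_next_role)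

-- ===== LEMMAS AND PROOFS =====

-- A's two-branch loop body is exactly Python's d.modify (append-with-default).
lemma pv_stepA_eq_modify (pp : PySem.Dict String (List (List String))) (p : List String × String) :
    (if pp.contains p.2 then pp.modify p.2 [] (fun l => l ++ [p.1]) else pp.insert p.2 [p.1])
      = pp.modify p.2 [] (fun l => l ++ [p.1]) := by
  by_cases h : pp.contains p.2
  · simp [h]
  · simp only [Bool.not_eq_true] at h
    simp [h, PySem.Dict.modify, PySem.Dict.getD_of_not_contains _ _ h]

-- the grouping fold's lookup at a key c
lemma pv_getD_group (ks : List (List String × String)) (c : String) :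
    (ks.foldl (fun pp p => pp.modify p.2 [] (fun l => l ++ [p.1]))
      (PySem.Dict.empty : PySem.Dict String (List (List String)))).getD c []
      = (ks.filter (fun p => p.2 == c)).map (fun p => p.1) := by
  have h := PySem.Dict.getD_foldl_modify_append (ks.map (fun p => (p.2, p.1)))
      (PySem.Dict.empty : PySem.Dict String (List (List String))) c
  rw [List.foldl_map] at h
  simpa [List.filter_map, List.map_map, Function.comp] using h

-- the grouping fold's items, in closed form
lemma pv_items_group (ks : List (List String × String)) :
    (ks.foldl (fun pp p => pp.modify p.2 [] (fun l => l ++ [p.1]))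
      (PySem.Dict.empty : PySem.Dict String (List (List String)))).items
      = (PySem.Set.ofList (ks.map (fun p => p.2))).map
          (fun a => (a, (ks.filter (fun p => p.2 == a)).map (fun p => p.1))) := by
  have hnd : (ks.foldl (fun pp p => pp.modify p.2 [] (fun l => l ++ [p.1]))
      (PySem.Dict.empty : PySem.Dict String (List (List String)))).keys.Nodup := by
    exact PySem.Dict.nodup_keys_foldl_modify_key ks (fun p => p.2) [] (fun _ p => fun l => l ++ [p.1]) _
      (by simp [PySem.Dict.keys_empty])
  rw [PySem.Dict.items_eq_map_keys _ hnd []]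
  rw [PySem.Dict.keys_foldl_modify_key ks (fun p => p.2) [] (fun _ p => fun l => l ++ [p.1])]
  have hupd : PySem.Set.update ((PySem.Dict.empty : PySem.Dict String (List (List String))).keys)
      (ks.map (fun p => p.2)) = PySem.Set.ofList (ks.map (fun p => p.2)) := rfl
  rw [hupd]
  exact List.map_congr_left (fun a _ => by rw [pv_getD_group])

-- A's key list (the dict's keys) is the first-occurrence dedup of the (pref, act) pairs
lemma pv_keysA (xs : List (List String × String × Int)) :
    (PySem.Dict.ofList (xs.map (fun e => ((e.1, e.2.1), e.2.2)))
        : PySem.Dict (List String × String) Int).keys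
      = PySem.Set.ofList (xs.map (fun e => (e.1, e.2.1))) := by
  show ((xs.map (fun e => ((e.1, e.2.1), e.2.2))).foldl
      (fun (acc : PySem.Dict (List String × String) Int) p => acc.insert p.1 p.2)
      PySem.Dict.empty).keys = _
  rw [List.foldl_map]
  rw [PySem.Dict.keys_foldl_insert_key xs (fun e => (e.1, e.2.1)) (fun _ e => e.2.2)]
  rfl

-- ===== VERDICT (by name: the statement is the Claim_ definition above) =====
theorem get_possible_prefixes_act_spec : Claim_equal_get_possible_prefixes_act := by
  intro xs _
  unfold Spec_get_possible_prefixes_act get_possible_prefixes_act get_possible_prefixes_act_alt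
  dsimp only
  rw [PySem.List.foldl_congr_mem _
        (fun pp p => if pp.contains p.2 then pp.modify p.2 [] (fun l => l ++ [p.1]) else pp.insert p.2 [p.1])
        (fun pp p => pp.modify p.2 [] (fun l => l ++ [p.1]))
        PySem.Dict.empty
        (fun acc x _ => pv_stepA_eq_modify acc x)]
  rw [pv_items_group, pv_keysA]
  rfl
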